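-- pv_equiv track=rewrite | github.com/maysaraadmin/khatma-app | import_quran_verses.py | get_part_number_for_ayah
-- ===== SOURCE A (Python) =====
-- def get_part_number_for_ayah(surah_number, ayah_number):
--     """
--     Determine which juz (part) a verse belongs to based on its surah and ayah number.
--     This is a simplified mapping and may not be 100% accurate.
--     """
--     # Juz boundaries (approximate)
--     juz_boundaries = [
--         (1, 1),      # Juz 1 starts at Surah 1, Ayah 1
--         (2, 142),    # Juz 2 starts at Surah 2, Ayah 142
--         (2, 253),    # Juz 3 starts at Surah 2, Ayah 253
--         (3, 92),     # Juz 4 starts at Surah 3, Ayah 92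
--         (4, 24),     # Juz 5 starts at Surah 4, Ayah 24
--         (4, 148),    # Juz 6 starts at Surah 4, Ayah 148
--         (5, 82),     # Juz 7 starts at Surah 5, Ayah 82
--         (6, 111),    # Juz 8 starts at Surah 6, Ayah 111
--         (7, 88),     # Juz 9 starts at Surah 7, Ayah 88
--         (8, 41),     # Juz 10 starts at Surah 8, Ayah 41
--         (9, 93),     # Juz 11 starts at Surah 9, Ayah 93
--         (11, 6),     # Juz 12 starts at Surah 11, Ayah 6
--         (12, 53),    # Juz 13 starts at Surah 12, Ayah 53
--         (15, 1),     # Juz 14 starts at Surah 15, Ayah 1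
--         (17, 1),     # Juz 15 starts at Surah 17, Ayah 1
--         (18, 75),    # Juz 16 starts at Surah 18, Ayah 75
--         (21, 1),     # Juz 17 starts at Surah 21, Ayah 1
--         (23, 1),     # Juz 18 starts at Surah 23, Ayah 1
--         (25, 21),    # Juz 19 starts at Surah 25, Ayah 21
--         (27, 56),    # Juz 20 starts at Surah 27, Ayah 56
--         (29, 46),    # Juz 21 starts at Surah 29, Ayah 46
--         (33, 31),    # Juz 22 starts at Surah 33, Ayah 31
--         (36, 28),    # Juz 23 starts at Surah 36, Ayah 28
--         (39, 32),    # Juz 24 starts at Surah 39, Ayah 32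
--         (41, 47),    # Juz 25 starts at Surah 41, Ayah 47
--         (46, 1),     # Juz 26 starts at Surah 46, Ayah 1
--         (51, 31),    # Juz 27 starts at Surah 51, Ayah 31
--         (58, 1),     # Juz 28 starts at Surah 58, Ayah 1
--         (67, 1),     # Juz 29 starts at Surah 67, Ayah 1
--         (78, 1),     # Juz 30 starts at Surah 78, Ayah 1
--     ]
--
--     # Convert surah_number and ayah_number to integers
--     surah_number = int(surah_number)
--     ayah_number = int(ayah_number)
--
--     # Find the juz for this ayah
--     juz_number = 1  # Default to first juz
--
--     for i, (juz_surah, juz_ayah) in enumerate(juz_boundaries):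
--         if (surah_number < juz_surah) or (surah_number == juz_surah and ayah_number < juz_ayah):
--             break
--         juz_number = i + 1
--
--     return juz_number
-- ===== SOURCE B (Python) =====
-- def get_part_number_for_ayah(surah_number, ayah_number):
--     """Binary search over the sorted juz boundary list instead of a linear scan."""
--     juz_boundaries = [
--         (1, 1), (2, 142), (2, 253), (3, 92), (4, 24), (4, 148), (5, 82),
--         (6, 111), (7, 88), (8, 41), (9, 93), (11, 6), (12, 53), (15, 1),
--         (17, 1), (18, 75), (21, 1), (23, 1), (25, 21), (27, 56), (29, 46),
--         (33, 31), (36, 28), (39, 32), (41, 47), (46, 1), (51, 31), (58, 1),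
--         (67, 1), (78, 1),
--     ]
--     key = (int(surah_number), int(ayah_number))
--     lo, hi = 0, len(juz_boundaries)
--     while lo < hi:
--         mid = (lo + hi) // 2
--         if key < juz_boundaries[mid]:
--             hi = mid
--         else:
--             lo = mid + 1
--     return max(1, lo)
-- ===== Notes on version B (the rewrite author's own statement) =====
-- stated objective: alternative
-- what changed: Replaced the linear enumerate-and-break scan keeping a juz_number accumulator with a hand-rolled bisect_right binary search over the same sorted boundary list, returning max(1, insertion point).
import Mathlib
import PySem

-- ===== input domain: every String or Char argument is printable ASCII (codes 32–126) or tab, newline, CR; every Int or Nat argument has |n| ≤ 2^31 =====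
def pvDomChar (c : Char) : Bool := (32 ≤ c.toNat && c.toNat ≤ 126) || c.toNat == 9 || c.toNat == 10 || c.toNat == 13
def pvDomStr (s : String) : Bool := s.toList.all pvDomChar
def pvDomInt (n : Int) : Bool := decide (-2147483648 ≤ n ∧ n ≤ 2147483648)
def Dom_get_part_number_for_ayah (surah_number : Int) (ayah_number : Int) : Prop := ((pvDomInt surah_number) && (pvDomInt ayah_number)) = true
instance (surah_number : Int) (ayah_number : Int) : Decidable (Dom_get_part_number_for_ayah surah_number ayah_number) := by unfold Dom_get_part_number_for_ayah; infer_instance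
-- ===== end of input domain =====

-- B replaces A's linear enumerate-and-break scan with a bisect_right binary search over the same boundary list (alternative algorithm, same result).

-- ===== PORT A =====
def juzBoundaries : List (Int × Int) :=
  [(1, 1), (2, 142), (2, 253), (3, 92), (4, 24), (4, 148), (5, 82),
   (6, 111), (7, 88), (8, 41), (9, 93), (11, 6), (12, 53), (15, 1),
   (17, 1), (18, 75), (21, 1), (23, 1), (25, 21), (27, 56), (29, 46),
   (33, 31), (36, 28), (39, 32), (41, 47), (46, 1), (51, 31), (58, 1),
   (67, 1), (78, 1)]

-- the 'for i, (juz_surah, juz_ayah) in enumerate(juz_boundaries)' loop with its break and the juz_number accumulator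
def juzScan (s a : Int) : List (Int × (Int × Int)) → Int → Int
  | [], j => j
  | (i, (js, ja)) :: rest, j =>
      if s < js ∨ (s = js ∧ a < ja) then j else juzScan s a rest (i + 1)

def get_part_number_for_ayah (surah_number : Int) (ayah_number : Int) : Int :=
  juzScan surah_number ayah_number (PySem.List.enumerate juzBoundaries) 1

-- ===== PORT B =====
-- the 'while lo < hi' bisect_right loop from Source B; fuel (≥ hi - lo at the call) only makes the loop total
def juzBisect (s a : Int) : Nat → Nat → Nat → Nat
  | 0, lo, _ => lo
  | fuel + 1, lo, hi =>
    if lo < hi then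
      if s < (juzBoundaries.getD ((lo + hi) / 2) (0, 0)).1 ∨
         (s = (juzBoundaries.getD ((lo + hi) / 2) (0, 0)).1 ∧ a < (juzBoundaries.getD ((lo + hi) / 2) (0, 0)).2) then
        juzBisect s a fuel lo ((lo + hi) / 2)
      else
        juzBisect s a fuel (((lo + hi) / 2) + 1) hi
    else lo

def get_part_number_for_ayah_alt (surah_number : Int) (ayah_number : Int) : Int :=
  max 1 (Int.ofNat (juzBisect surah_number ayah_number juzBoundaries.length 0 juzBoundaries.length))

-- ===== PRECONDITION & SPEC =====
def Spec_get_part_number_for_ayah (surah_number : Int) (ayah_number : Int) (out : Int) : Prop := out = get_part_number_for_ayah_alt surah_number ayah_number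
instance (surah_number : Int) (ayah_number : Int) (out : Int) : Decidable (Spec_get_part_number_for_ayah surah_number ayah_number out) := by unfold Spec_get_part_number_for_ayah; infer_instance

-- ===== CLAIM (what is proved, stated in full; the proofs are below) =====
def Claim_equal_get_part_number_for_ayah : Prop := ∀ (surah_number : Int) (ayah_number : Int), Dom_get_part_number_for_ayah surah_number ayah_number → Spec_get_part_number_for_ayah surah_number ayah_number (get_part_number_for_ayah surah_number ayah_number)

-- ===== LEMMAS AND PROOFS =====

-- "the key (s, a) is lexicographically below the boundary p" — the break/branch condition of both loops
def jKeep (s a : Int) (p : Int × Int) : Bool := ! decide (s < p.1 ∨ (s = p.1 ∧ a < p.2))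

-- number of boundaries ≤ (s, a): the common value both loops compute (clamped to ≥ 1)
def jT (s a : Int) : Nat := (juzBoundaries.takeWhile (jKeep s a)).length

theorem juzScan_eq (s a : Int) (l : List (Int × Int)) (k j : Int) :
    juzScan s a (PySem.List.enumerate l k) j =
      if (l.takeWhile (jKeep s a)).length = 0 then j
      else k + ((l.takeWhile (jKeep s a)).length : Int) := by
  induction l generalizing k j with
  | nil => simp [PySem.List.enumerate, juzScan]
  | cons p l ih =>
    obtain ⟨js, ja⟩ := p
    rw [PySem.List.enumerate_cons]
    by_cases hc : s < js ∨ (s = js ∧ a < ja)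
    · have hk : jKeep s a (js, ja) = false := by simp [jKeep, hc]
      simp [juzScan, hc, hk]
    · have hk : jKeep s a (js, ja) = true := by simp [jKeep, hc]
      have h1 : (((js, ja) :: l).takeWhile (jKeep s a)).length
          = (l.takeWhile (jKeep s a)).length + 1 := by
        rw [List.takeWhile_cons, hk]; simp
      rw [h1]
      simp only [juzScan, if_neg hc]
      rw [ih]
      split_ifs
      all_goals first | contradiction | (push_cast; omega)

theorem takeWhile_getD_of_lt {α : Type} (q : α → Bool) (d : α) :
    ∀ (l : List α) (i : Nat), i < (l.takeWhile q).length → q (l.getD i d) = true := by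
  intro l
  induction l with
  | nil => intro i h; simp at h
  | cons x l ih =>
    intro i h
    cases hq : q x with
    | false => rw [List.takeWhile_cons, hq] at h; simp at h
    | true =>
      rw [List.takeWhile_cons, hq] at h
      cases i with
      | zero => simpa using hq
      | succ i => exact ih i (by simpa using h)

theorem takeWhile_getD_of_ge {α : Type} (q : α → Bool) (d : α) :
    ∀ (l : List α), l.Pairwise (fun p r => q p = false → q r = false) →
      ∀ i : Nat, (l.takeWhile q).length ≤ i → i < l.length → q (l.getD i d) = false := by
  intro l
  induction l with
  | nil => intro _ i _ h; simp at h
  | cons x l ih =>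
    intro hp i hge hlt
    rw [List.pairwise_cons] at hp
    cases hq : q x with
    | false =>
      cases i with
      | zero => simpa using hq
      | succ i =>
        have hlt' : i < l.length := by simpa using hlt
        have hmem : l.getD i d ∈ l := by
          rw [List.getD_eq_getElem l d hlt']; exact List.getElem_mem hlt'
        simpa using hp.1 _ hmem hq
    | true =>
      rw [List.takeWhile_cons, hq] at hge
      cases i with
      | zero => simp at hge
      | succ i =>
        have := ih hp.2 i (by simpa using hge) (by simpa using hlt)
        simpa using this

theorem juz_sorted : juzBoundaries.Pairwise (fun p r => p.1 < r.1 ∨ (p.1 = r.1 ∧ p.2 < r.2)) := by decide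

theorem juz_mono (s a : Int) :
    juzBoundaries.Pairwise (fun p r => jKeep s a p = false → jKeep s a r = false) := by
  refine juz_sorted.imp ?_
  intro p r h hf
  simp only [jKeep, Bool.not_eq_false', decide_eq_true_eq] at hf ⊢
  rcases hf with h1 | h2 <;> rcases h with g1 | g2 <;> [left; left; left; skip] <;> omega

theorem juz_cond_iff (s a : Int) (i : Nat) (hi : i < 30) :
    (s < (juzBoundaries.getD i (0, 0)).1 ∨
      (s = (juzBoundaries.getD i (0, 0)).1 ∧ a < (juzBoundaries.getD i (0, 0)).2)) ↔ jT s a ≤ i := by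
  have hlen : juzBoundaries.length = 30 := by decide
  constructor
  · intro h
    by_contra hti
    have hti' : i < (juzBoundaries.takeWhile (jKeep s a)).length := by
      unfold jT at hti; omega
    have := takeWhile_getD_of_lt (jKeep s a) (0, 0) juzBoundaries i hti'
    simp only [jKeep, Bool.not_eq_true', decide_eq_false_iff_not] at this
    exact this h
  · intro h
    have h' : (juzBoundaries.takeWhile (jKeep s a)).length ≤ i := by unfold jT at h; omega
    have := takeWhile_getD_of_ge (jKeep s a) (0, 0) juzBoundaries (juz_mono s a) i h' (by omega)
    simp only [jKeep, Bool.not_eq_false', decide_eq_true_eq] at this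
    exact this

theorem juzBisect_eq (s a : Int) :
    ∀ (fuel lo hi : Nat), hi ≤ 30 → lo ≤ jT s a → jT s a ≤ hi → hi - lo ≤ fuel →
      juzBisect s a fuel lo hi = jT s a := by
  intro fuel
  induction fuel with
  | zero => intro lo hi h1 h2 h3 h4; simp only [juzBisect]; omega
  | succ f ih =>
    intro lo hi h1 h2 h3 h4
    by_cases hlh : lo < hi
    · rw [juzBisect, if_pos hlh]
      by_cases ht : jT s a ≤ (lo + hi) / 2
      · rw [if_pos ((juz_cond_iff s a _ (by omega)).2 ht)]
        exact ih lo ((lo + hi) / 2) (by omega) h2 ht (by omega)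
      · rw [if_neg (fun hc => ht ((juz_cond_iff s a _ (by omega)).1 hc))]
        exact ih (((lo + hi) / 2) + 1) hi h1 (by omega) h3 (by omega)
    · rw [juzBisect, if_neg hlh]; omega

-- ===== VERDICT (by name: the statement is the Claim_ definition above) =====
theorem get_part_number_for_ayah_spec : Claim_equal_get_part_number_for_ayah := by
  intro s a _
  unfold Spec_get_part_number_for_ayah get_part_number_for_ayah get_part_number_for_ayah_alt
  have hlen : juzBoundaries.length = 30 := by decide
  have hT : jT s a ≤ 30 := by
    have := (List.takeWhile_prefix (l := juzBoundaries) (jKeep s a)).length_le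
    unfold jT; omega
  rw [juzScan_eq, hlen, juzBisect_eq s a 30 0 30 (by omega) (by omega) hT (by omega)]
  unfold jT
  split_ifs <;> rw [Int.ofNat_eq_natCast] <;> omega
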